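-- pv_equiv track=rewrite | github.com/ArturoPerezSanchez/Leetcode-Problems | 2306. Naming a Company/Solution.py | distinctNames2
-- ===== SOURCE A (Python) =====
-- from typing import List
--
-- def distinctNames2(ideas: List[str]) -> int:
--     res = 0
--     for i in range(len(ideas)):
--         for j in range(i, len(ideas)):
--             newName = ideas[j][0] + ideas[i][1:]
--             newName2 = ideas[i][0] + ideas[j][1:]
--             if (newName not in ideas and newName2 not in ideas):
--                 res +=2
--     return res
-- ===== SOURCE B (Python) =====
-- from typing import List
--
-- def distinctNames2(ideas: List[str]) -> int:
--     # group by first letter: for each unordered pair of distinct first letters,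
--     # multiply the counts of ideas whose suffix is not shared with the other group
--     letters = list(dict.fromkeys(s[0] for s in ideas))
--     res = 0
--     for x in range(len(letters)):
--         for y in range(x + 1, len(letters)):
--             a, b = letters[x], letters[y]
--             sa = {s[1:] for s in ideas if s[0] == a}
--             sb = {s[1:] for s in ideas if s[0] == b}
--             ca = sum(1 for s in ideas if s[0] == a and s[1:] not in sb)
--             cb = sum(1 for s in ideas if s[0] == b and s[1:] not in sa)
--             res += 2 * ca * cb
--     return res
-- ===== Notes on version B (the rewrite author's own statement) =====
-- stated objective: faster
-- what changed: A scans all O(n^2) index pairs and does an O(n) list-membership test per pair; B groups suffixes by first letter once and, for each pair of distinct first letters, multiplies the counts of ideas whose suffix is not shared with the other letter's suffix set.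
import Mathlib
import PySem

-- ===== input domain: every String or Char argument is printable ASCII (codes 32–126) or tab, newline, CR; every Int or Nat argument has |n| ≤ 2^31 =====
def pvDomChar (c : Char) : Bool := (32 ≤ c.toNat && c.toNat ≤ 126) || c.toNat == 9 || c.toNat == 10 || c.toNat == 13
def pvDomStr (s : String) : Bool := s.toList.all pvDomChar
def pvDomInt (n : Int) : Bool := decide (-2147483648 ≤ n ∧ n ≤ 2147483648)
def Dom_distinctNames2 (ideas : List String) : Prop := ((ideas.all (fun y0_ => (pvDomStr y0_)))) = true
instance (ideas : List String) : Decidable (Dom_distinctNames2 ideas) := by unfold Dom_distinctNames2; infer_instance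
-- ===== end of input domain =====

-- B replaces A's cubic all-pairs scan (membership test per pair) by grouping suffixes under
-- their first letter and multiplying non-shared-suffix counts per pair of distinct letters.

-- shared helpers: Python's  s[0]  and  s[1:]  on code-point lists (strings are handled on
-- their code-point lists throughout both ports; String equality ↔ toList equality, exact)
def pvFirst (s : List Char) : Char := PySem.List.pyGetD s 0 default
def pvSuf (s : List Char) : List Char := PySem.List.slice s (some 1) none

-- ===== PORT A =====
def distinctNames2 (ideas : List String) : Int :=
  let xs := ideas.map String.toList
  let n : Int := PySem.List.len xs
  (PySem.List.pyRange 0 n 1).foldl (fun res i =>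
    (PySem.List.pyRange i n 1).foldl (fun res j =>
      if !(xs.contains (pvFirst (PySem.List.pyGetD xs j []) :: pvSuf (PySem.List.pyGetD xs i []))) &&
         !(xs.contains (pvFirst (PySem.List.pyGetD xs i []) :: pvSuf (PySem.List.pyGetD xs j [])))
      then res + 2 else res) res) 0

-- ===== PORT B =====
def distinctNames2_alt (ideas : List String) : Int :=
  let xs := ideas.map String.toList
  -- letters = list(dict.fromkeys(s[0] for s in ideas))
  let letters : List Char := PySem.List.dedup (xs.map pvFirst)
  let m : Int := PySem.List.len letters
  (PySem.List.pyRange 0 m 1).foldl (fun res x =>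
    (PySem.List.pyRange (x + 1) m 1).foldl (fun res y =>
      let a := PySem.List.pyGetD letters x default
      let b := PySem.List.pyGetD letters y default
      let sa : PySem.Set (List Char) :=
        PySem.Set.ofList ((xs.filter (fun s => pvFirst s == a)).map pvSuf)
      let sb : PySem.Set (List Char) :=
        PySem.Set.ofList ((xs.filter (fun s => pvFirst s == b)).map pvSuf)
      -- ca/cb: sum(1 for s in ideas if …) is a count
      let ca : Int := (xs.countP (fun s => pvFirst s == a && !(PySem.Set.contains sb (pvSuf s))) : Int)
      let cb : Int := (xs.countP (fun s => pvFirst s == b && !(PySem.Set.contains sa (pvSuf s))) : Int)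
      res + 2 * ca * cb) res) 0

-- ===== PRECONDITION & SPEC =====
-- Python's  s[0]  raises IndexError on an empty string: Pre_ excludes idea lists containing ""
def Pre_distinctNames2 (ideas : List String) : Prop := ∀ s ∈ ideas, s ≠ ""
instance (ideas : List String) : Decidable (Pre_distinctNames2 ideas) := by unfold Pre_distinctNames2; infer_instance
def pvWitness_distinctNames2 : List String := ["coffee", "donuts", "time", "toffee"]
def Spec_distinctNames2 (ideas : List String) (out : Int) : Prop := out = distinctNames2_alt ideas
instance (ideas : List String) (out : Int) : Decidable (Spec_distinctNames2 ideas out) := by unfold Spec_distinctNames2; infer_instance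

-- ===== CLAIM (what is proved, stated in full; the proofs are below) =====
def Claim_equal_distinctNames2 : Prop := ∀ (ideas : List String), Dom_distinctNames2 ideas → Pre_distinctNames2 ideas → Spec_distinctNames2 ideas (distinctNames2 ideas)

-- ===== LEMMAS AND PROOFS =====

-- proof-layer vocabulary: A's pair weight, B's per-letter count predicate, first-letter list
def wA (xs : List (List Char)) (s t : List Char) : Int :=
  if !(xs.contains (pvFirst t :: pvSuf s)) && !(xs.contains (pvFirst s :: pvSuf t)) then 2 else 0

def qB (xs : List (List Char)) (a b : Char) (s : List Char) : Bool :=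
  pvFirst s == a && !(xs.contains (b :: pvSuf s))

def cntI (xs l : List (List Char)) (a b : Char) : Int := (l.countP (qB xs a b) : Int)

def pvLetters (xs : List (List Char)) : List Char := PySem.List.dedup (xs.map pvFirst)

/-- sum of a weight over the ordered pairs (earlier element, later element) of a list -/
def pairFold {α : Type} (w : α → α → Int) : List α → Int
  | [] => 0
  | s :: r => (r.map (w s)).sum + pairFold w r

lemma cons_first_suf (s : List Char) (h : s ≠ []) : pvFirst s :: pvSuf s = s := by
  cases s with
  | nil => exact absurd rfl h
  | cons c t =>
    have h1 : PySem.List.slice (c :: t) (some (1:Int)) none = List.drop (1:Int).toNat (c :: t) :=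
      PySem.List.slice_from (c :: t) (by norm_num)
    simp [pvFirst, pvSuf, PySem.List.pyGetD_zero_cons, h1]

lemma foldl_if_two {α : Type} (p : α → Bool) (l : List α) (a : Int) :
    l.foldl (fun acc x => if p x then acc + 2 else acc) a
      = a + (l.map (fun x => if p x then (2:Int) else 0)).sum := by
  induction l generalizing a with
  | nil => simp
  | cons x t ih => by_cases h : p x <;> simp [h, ih] <;> ring

lemma sum_map_two {α : Type} (p : α → Bool) (l : List α) :
    (l.map (fun x => if p x then (2:Int) else 0)).sum = 2 * (l.countP p : Int) := by
  induction l with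
  | nil => simp
  | cons x t ih => by_cases h : p x <;> simp [h, ih, List.countP_cons] <;> ring

lemma pairFold_eq_zero {α : Type} (w : α → α → Int) (ls : List α) (h : ∀ a b, w a b = 0) :
    pairFold w ls = 0 := by
  induction ls with
  | nil => rfl
  | cons a r ih =>
    simp only [pairFold, ih]
    rw [List.sum_eq_zero (by intro x hx; rcases List.mem_map.1 hx with ⟨b, _, rfl⟩; exact h a b)]
    ring

lemma pairFold_congr {α : Type} (w w' : α → α → Int) (ls : List α) (hnd : ls.Nodup)
    (h : ∀ a ∈ ls, ∀ b ∈ ls, a ≠ b → w a b = w' a b) : pairFold w ls = pairFold w' ls := by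
  induction ls with
  | nil => rfl
  | cons a r ih =>
    have hna : a ∉ r := (List.nodup_cons.1 hnd).1
    simp only [pairFold]
    rw [ih hnd.of_cons (fun x hx y hy hxy => h x (List.mem_cons_of_mem _ hx) y (List.mem_cons_of_mem _ hy) hxy)]
    congr 1
    exact congrArg List.sum (List.map_congr_left (fun b hb =>
      h a (List.mem_cons_self ..) b (List.mem_cons_of_mem _ hb) (fun e => hna (e ▸ hb))))

lemma pairFold_add {α : Type} (u v : α → α → Int) (ls : List α) :
    pairFold (fun a b => u a b + v a b) ls = pairFold u ls + pairFold v ls := by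
  induction ls with
  | nil => rfl
  | cons a r ih =>
    simp only [pairFold, ih]
    rw [PySem.List.sum_map_add_int]
    ring

lemma sum_indicator_nodup (ls : List Char) (a : Char) (f : Char → Int)
    (hnd : ls.Nodup) (ha : a ∈ ls) :
    (ls.map (fun b => if b = a then f b else 0)).sum = f a := by
  induction ls with
  | nil => simp at ha
  | cons c r ih =>
    by_cases hca : c = a
    · subst hca
      have hz : ∀ x ∈ List.map (fun b => if b = c then f b else 0) r, x = 0 := by
        intro x hx
        rcases List.mem_map.1 hx with ⟨b, hb, rfl⟩
        have : b ≠ c := fun e => (List.nodup_cons.1 hnd).1 (e ▸ hb)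
        simp [this]
      simp [List.sum_eq_zero hz]
    · have har : a ∈ r := by rcases List.mem_cons.1 ha with rfl | h; exact absurd rfl hca; exact h
      simp [hca, ih hnd.of_cons har]

lemma countP_partition {β : Type} (ls : List Char) (k : β → Char) (p : β → Bool) (r : List β)
    (hnd : ls.Nodup) (hk : ∀ t ∈ r, k t ∈ ls) :
    (ls.map (fun b => ((r.countP (fun t => (k t == b) && p t)) : Int))).sum = (r.countP p : Int) := by
  induction r with
  | nil => simp
  | cons t r ih =>
    have ih' := ih (fun x hx => hk x (List.mem_cons_of_mem _ hx))
    simp only [List.countP_cons]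
    push_cast
    rw [PySem.List.sum_map_add_int, ih']
    congr 1
    by_cases hp : p t
    · have ha := hk t (List.mem_cons_self ..)
      have : (ls.map (fun b => if (k t == b && p t) = true then (1:Int) else 0))
           = (ls.map (fun b => if b = k t then (fun _ => (1:Int)) b else 0)) := by
        apply List.map_congr_left
        intro b _
        rcases eq_or_ne b (k t) with rfl | hb
        · simp [hp]
        · have hkb : (k t == b) = false := beq_eq_false_iff_ne.2 (Ne.symm hb)
          simp [hkb, hb]
      rw [this, sum_indicator_nodup ls (k t) _ hnd ha]
      simp [hp]
    · simp only [Bool.not_eq_true] at hp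
      simp [hp]

lemma sum_map_filter_of_zero {α : Type} (p : α → Bool) (f : α → Int) (ls : List α)
    (h : ∀ b ∈ ls, p b = false → f b = 0) :
    ((ls.filter p).map f).sum = (ls.map f).sum := by
  induction ls with
  | nil => rfl
  | cons a r ih =>
    have ih' := ih (fun b hb => h b (List.mem_cons_of_mem _ hb))
    by_cases hp : p a
    · simp [List.filter_cons, hp, ih']
    · simp only [List.filter_cons, Bool.not_eq_true] at *
      simp [hp, ih', h a (List.mem_cons_self ..) (by simpa using hp)]

lemma range_drop_sum {α : Type} (g : α → α → Int) (l : List α) (d : α) (init : Int) :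
    (List.range l.length).foldl (fun res k => res + ((l.drop k).map (g (l.getD k d))).sum) init
      = init + (l.map (fun s => g s s)).sum + pairFold g l := by
  induction l generalizing init with
  | nil => simp [pairFold]
  | cons s r ih =>
    rw [List.length_cons, List.range_succ_eq_map, List.foldl_cons, List.foldl_map]
    rw [show (fun (res : Int) k => res + (List.map (g ((s :: r).getD (k + 1) d)) ((s :: r).drop (k + 1))).sum)
          = (fun (res : Int) (k : Nat) => res + ((r.drop k).map (g (r.getD k d))).sum) by funext res k; simp]
    rw [ih]
    simp [pairFold]
    ring

lemma range_dropSucc_sum {α : Type} (g : α → α → Int) (l : List α) (d : α) (init : Int) :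
    (List.range l.length).foldl (fun res k => res + ((l.drop (k + 1)).map (g (l.getD k d))).sum) init
      = init + pairFold g l := by
  induction l generalizing init with
  | nil => simp [pairFold]
  | cons s r ih =>
    rw [List.length_cons, List.range_succ_eq_map, List.foldl_cons, List.foldl_map]
    rw [show (fun (res : Int) k => res + (List.map (g ((s :: r).getD (k + 1) d)) ((s :: r).drop (k + 1 + 1))).sum)
          = (fun (res : Int) (k : Nat) => res + ((r.drop (k+1)).map (g (r.getD k d))).sum) by funext res k; simp]
    rw [ih]
    simp [pairFold]
    ring

lemma pairFold_delta_zero (a' : Char) (D C : Char → Int) (ls : List Char) (ha : a' ∉ ls) :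
    pairFold (fun a b => (if a = a' then 2 * D b * C b else 0) + (if b = a' then 2 * D a * C a else 0)) ls = 0 := by
  induction ls with
  | nil => rfl
  | cons a r ih =>
    have haa : a ≠ a' := fun e => ha (e ▸ List.mem_cons_self ..)
    have har : a' ∉ r := fun h => ha (List.mem_cons_of_mem _ h)
    simp only [pairFold, ih har]
    rw [List.sum_eq_zero]
    · ring
    · intro x hx
      rcases List.mem_map.1 hx with ⟨b, hb, rfl⟩
      have hbb : b ≠ a' := fun e => har (e ▸ hb)
      simp [haa, hbb]

lemma pairFold_delta (a' : Char) (D C : Char → Int) (ls : List Char)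
    (hnd : ls.Nodup) (ha : a' ∈ ls) :
    pairFold (fun a b => (if a = a' then 2 * D b * C b else 0) + (if b = a' then 2 * D a * C a else 0)) ls
      = ((ls.filter (fun b => !(b = a' : Bool))).map (fun b => 2 * D b * C b)).sum := by
  induction ls with
  | nil => simp at ha
  | cons a r ih =>
    by_cases haa : a = a'
    · subst haa
      have har : a ∉ r := (List.nodup_cons.1 hnd).1
      have hmap : (r.map (fun b => (if a = a then 2 * D b * C b else 0) + (if b = a then 2 * D a * C a else 0)))
           = (r.map (fun b => 2 * D b * C b)) := by
        apply List.map_congr_left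
        intro b hb
        have : b ≠ a := fun e => har (e ▸ hb)
        simp [this]
      have hfil : (r.filter (fun b => !(b = a : Bool))) = r := by
        apply List.filter_eq_self.2
        intro b hb
        have : b ≠ a := fun e => har (e ▸ hb)
        simp [this]
      rw [pairFold, pairFold_delta_zero a D C r har, hmap]
      simp [hfil]
    · have har : a' ∈ r := by
        rcases List.mem_cons.1 ha with h | h
        · exact absurd h.symm haa
        · exact h
      have hmap : (r.map (fun b => (if a = a' then 2 * D b * C b else 0) + (if b = a' then 2 * D a * C a else 0)))
           = (r.map (fun b => if b = a' then (fun _ => 2 * D a * C a) b else 0)) := by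
        apply List.map_congr_left
        intro b _
        simp [haa]
      rw [pairFold, ih hnd.of_cons har, hmap,
          sum_indicator_nodup r a' _ hnd.of_cons har]
      simp [haa]

lemma mem_L_iff (xs : List (List Char)) (hne : ∀ s ∈ xs, s ≠ []) (b : Char) (u : List Char) :
    (u ∈ (xs.filter (fun s => pvFirst s == b)).map pvSuf) ↔ (b :: u) ∈ xs := by
  constructor
  · intro h
    rcases List.mem_map.1 h with ⟨s, hs, rfl⟩
    rcases List.mem_filter.1 hs with ⟨hsx, hfb⟩
    have hb : pvFirst s = b := by simpa using hfb
    have hcf := cons_first_suf s (hne s hsx)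
    rw [hb] at hcf
    rwa [← hcf] at hsx
  · intro h
    have h1 : pvFirst (b :: u) = b := by simp [pvFirst, PySem.List.pyGetD_zero_cons]
    have h2 : pvSuf (b :: u) = u := by
      have := PySem.List.slice_from (b :: u) (a := 1) (by norm_num)
      simp [pvSuf, this]
    exact List.mem_map.2 ⟨b :: u, List.mem_filter.2 ⟨h, by simp [h1]⟩, h2⟩

lemma set_contains_eq (xs : List (List Char)) (hne : ∀ s ∈ xs, s ≠ []) (b : Char) (u : List Char) :
    PySem.Set.contains (PySem.Set.ofList ((xs.filter (fun s => pvFirst s == b)).map pvSuf)) u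
      = xs.contains (b :: u) := by
  have hm := mem_L_iff xs hne b u
  by_cases h : (b :: u) ∈ xs
  · have : u ∈ PySem.Set.ofList ((xs.filter (fun s => pvFirst s == b)).map pvSuf) :=
      (PySem.Set.mem_ofList _ _).2 (hm.2 h)
    simp [PySem.Set.contains, this, h]
  · have : u ∉ PySem.Set.ofList ((xs.filter (fun s => pvFirst s == b)).map pvSuf) :=
      fun hc => h (hm.1 ((PySem.Set.mem_ofList _ _).1 hc))
    simp [PySem.Set.contains, this, h]

lemma A_eq (ideas : List String) :
    distinctNames2 ideas = (List.map (fun s => wA (ideas.map String.toList) s s) (ideas.map String.toList)).sum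
        + pairFold (wA (ideas.map String.toList)) (ideas.map String.toList) := by
  unfold distinctNames2
  simp only []
  set xs := ideas.map String.toList with hxs
  rw [show PySem.List.len xs = ((xs.length : Nat) : Int) by simp [PySem.List.len]]
  rw [PySem.List.pyRange_zero_natCast, List.foldl_map]
  have hbody : (fun (x : Int) (y : Nat) =>
      List.foldl
        (fun res j =>
          if (!xs.contains (pvFirst (PySem.List.pyGetD xs j []) :: pvSuf (PySem.List.pyGetD xs (y:Int) [])) &&
              !xs.contains (pvFirst (PySem.List.pyGetD xs (y:Int) []) :: pvSuf (PySem.List.pyGetD xs j []))) = true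
          then res + 2 else res)
        x (PySem.List.pyRange (y:Int) (xs.length : Int)))
      = (fun (res : Int) (k : Nat) => res + ((xs.drop k).map (wA xs (xs.getD k []))).sum) := by
    funext res k
    rw [PySem.List.foldl_pyRange_pyGetD' xs []
        (f := fun res sj => if (!xs.contains (pvFirst sj :: pvSuf (PySem.List.pyGetD xs (k:Int) [])) &&
              !xs.contains (pvFirst (PySem.List.pyGetD xs (k:Int) []) :: pvSuf sj)) = true
          then res + 2 else res)
        res (by positivity)]
    rw [foldl_if_two]
    simp only [PySem.List.pyGetD_natCast, Int.toNat_natCast]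
    rfl
  rw [hbody, range_drop_sum (wA xs) xs [] 0]
  ring

lemma B_eq (ideas : List String) (hne : ∀ s ∈ ideas.map String.toList, s ≠ []) :
    distinctNames2_alt ideas
      = pairFold (fun a b => 2 * cntI (ideas.map String.toList) (ideas.map String.toList) a b
                               * cntI (ideas.map String.toList) (ideas.map String.toList) b a)
          (pvLetters (ideas.map String.toList)) := by
  unfold distinctNames2_alt
  simp only []
  set xs := ideas.map String.toList with hxs
  set L := PySem.List.dedup (xs.map pvFirst) with hL
  rw [show PySem.List.len L = ((L.length : Nat) : Int) by simp [PySem.List.len]]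
  rw [PySem.List.pyRange_zero_natCast, List.foldl_map]
  have hq : ∀ (a b : Char),
      (fun s => pvFirst s == a && !(PySem.Set.contains (PySem.Set.ofList ((xs.filter (fun s => pvFirst s == b)).map pvSuf)) (pvSuf s)))
        = qB xs a b := by
    intro a b
    funext s
    rw [set_contains_eq xs hne b (pvSuf s)]
    rfl
  have hbody : (fun (x : Int) (y : Nat) =>
      List.foldl
        (fun res j =>
          res + 2 * ((xs.countP (fun s => pvFirst s == PySem.List.pyGetD L (y:Int) default &&
                  !(PySem.Set.contains (PySem.Set.ofList ((xs.filter (fun s => pvFirst s == PySem.List.pyGetD L j default)).map pvSuf)) (pvSuf s)))) : Int)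
              * ((xs.countP (fun s => pvFirst s == PySem.List.pyGetD L j default &&
                  !(PySem.Set.contains (PySem.Set.ofList ((xs.filter (fun s => pvFirst s == PySem.List.pyGetD L (y:Int) default)).map pvSuf)) (pvSuf s)))) : Int))
        x (PySem.List.pyRange ((y:Int) + 1) (L.length : Int)))
      = (fun (res : Int) (k : Nat) =>
          res + ((L.drop (k + 1)).map (fun b => 2 * cntI xs xs (L.getD k default) b * cntI xs xs b (L.getD k default))).sum) := by
    funext res k
    rw [show ((k:Int) + 1) = (((k + 1 : Nat) : Int)) by push_cast; ring]
    rw [PySem.List.foldl_pyRange_pyGetD' L default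
        (f := fun res b =>
          res + 2 * ((xs.countP (fun s => pvFirst s == PySem.List.pyGetD L (k:Int) default &&
                  !(PySem.Set.contains (PySem.Set.ofList ((xs.filter (fun s => pvFirst s == b)).map pvSuf)) (pvSuf s)))) : Int)
              * ((xs.countP (fun s => pvFirst s == b &&
                  !(PySem.Set.contains (PySem.Set.ofList ((xs.filter (fun s => pvFirst s == PySem.List.pyGetD L (k:Int) default)).map pvSuf)) (pvSuf s)))) : Int))
        res (by positivity)]
    rw [PySem.List.foldl_add]
    simp only [PySem.List.pyGetD_natCast, Int.toNat_natCast]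
    congr 1
    apply congrArg List.sum
    apply List.map_congr_left
    intro b _
    rw [hq (L.getD k default) b, hq b (L.getD k default)]
    rfl
  rw [hbody, range_dropSucc_sum (fun a b => 2 * cntI xs xs a b * cntI xs xs b a) L default 0,
     zero_add]
  rfl

def pvDd (xs : List (List Char)) (s : List Char) (b : Char) : Int :=
  if xs.contains (b :: pvSuf s) then 0 else 1

lemma cnt_cons (xs r : List (List Char)) (s : List Char) (a b : Char) :
    cntI xs (s :: r) a b
      = cntI xs r a b + (if a = pvFirst s then pvDd xs s b else 0) := by
  simp only [cntI, List.countP_cons]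
  push_cast
  congr 1
  by_cases haa : a = pvFirst s
  · rw [if_pos haa]
    have h1 : (pvFirst s == a) = true := beq_iff_eq.2 haa.symm
    simp only [qB, h1, Bool.true_and, pvDd]
    by_cases hc : xs.contains (b :: pvSuf s) <;> simp [hc]
  · rw [if_neg haa]
    have h1 : (pvFirst s == a) = false := beq_eq_false_iff_ne.2 (fun e => haa e.symm)
    simp [qB, h1]

lemma pvDd_self (xs : List (List Char)) (s : List Char) (hs : s ≠ []) (hsx : s ∈ xs) :
    pvDd xs s (pvFirst s) = 0 := by
  have hmem : pvFirst s :: pvSuf s ∈ xs := by rw [cons_first_suf s hs]; exact hsx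
  simp [pvDd, hmem]

lemma per_letter (xs : List (List Char)) (hne : ∀ t ∈ xs, t ≠ []) (r : List (List Char))
    (hlr : ∀ t ∈ r, t ∈ xs) (s : List Char) (b : Char) :
    ((r.countP (fun t => (pvFirst t == b) &&
        (!(xs.contains (pvFirst t :: pvSuf s)) && !(xs.contains (pvFirst s :: pvSuf t))))) : Int)
      = if b = pvFirst s then 0 else pvDd xs s b * cntI xs r b (pvFirst s) := by
  by_cases hba : b = pvFirst s
  · rw [if_pos hba]
    have h0 : r.countP (fun t => (pvFirst t == b) &&
        (!(xs.contains (pvFirst t :: pvSuf s)) && !(xs.contains (pvFirst s :: pvSuf t)))) = 0 := by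
      rw [List.countP_eq_zero]
      intro t ht
      by_cases hf : pvFirst t = b
      · have htx := hlr t ht
        have hcs : (pvFirst s :: pvSuf t) = t := by
          rw [← hba, ← hf]
          exact cons_first_suf t (hne t htx)
        have hmem : pvFirst s :: pvSuf t ∈ xs := by rw [hcs]; exact htx
        simp [hf, hmem]
      · simp [hf]
    rw [h0]; rfl
  · rw [if_neg hba]
    by_cases hcb : (b :: pvSuf s) ∈ xs
    · have h0 : r.countP (fun t => (pvFirst t == b) &&
          (!(xs.contains (pvFirst t :: pvSuf s)) && !(xs.contains (pvFirst s :: pvSuf t)))) = 0 := by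
        rw [List.countP_eq_zero]
        intro t ht
        by_cases hf : pvFirst t = b
        · rw [hf]
          simp [hcb]
        · simp [hf]
      rw [h0]
      simp [pvDd, hcb]
    · have hcong : r.countP (fun t => (pvFirst t == b) &&
          (!(xs.contains (pvFirst t :: pvSuf s)) && !(xs.contains (pvFirst s :: pvSuf t))))
          = r.countP (qB xs b (pvFirst s)) := by
        apply List.countP_congr
        intro t ht
        by_cases hf : pvFirst t = b
        · simp [qB, hf, hcb]
        · simp [qB, hf]
      rw [hcong]
      simp [pvDd, hcb, cntI]

lemma middle_eq (xs : List (List Char)) (hne : ∀ t ∈ xs, t ≠ []) (r : List (List Char))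
    (hlr : ∀ t ∈ r, t ∈ xs) (s : List Char) (hs : s ≠ []) (hsx : s ∈ xs) :
    (r.map (wA xs s)).sum
      = (((pvLetters xs).filter (fun b => !(b = pvFirst s : Bool))).map
          (fun b => 2 * pvDd xs s b * cntI xs r b (pvFirst s))).sum := by
  have hndL : (pvLetters xs).Nodup := PySem.List.nodup_dedup _
  have hmem : ∀ t ∈ r, pvFirst t ∈ pvLetters xs := fun t ht =>
    (PySem.List.mem_dedup _ _).2 (List.mem_map.2 ⟨t, hlr t ht, rfl⟩)
  have hPA : (r.map (wA xs s)).sum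
      = 2 * ((r.countP (fun t => !(xs.contains (pvFirst t :: pvSuf s)) && !(xs.contains (pvFirst s :: pvSuf t)))) : Int) := by
    rw [← sum_map_two]
    rfl
  have hpart := countP_partition (pvLetters xs) pvFirst
    (fun t => !(xs.contains (pvFirst t :: pvSuf s)) && !(xs.contains (pvFirst s :: pvSuf t))) r hndL hmem
  calc (r.map (wA xs s)).sum
      = 2 * ((r.countP (fun t => !(xs.contains (pvFirst t :: pvSuf s)) && !(xs.contains (pvFirst s :: pvSuf t)))) : Int) := hPA
    _ = 2 * ((pvLetters xs).map (fun b => ((r.countP (fun t => (pvFirst t == b) &&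
          (!(xs.contains (pvFirst t :: pvSuf s)) && !(xs.contains (pvFirst s :: pvSuf t))))) : Int))).sum := by rw [hpart]
    _ = 2 * ((pvLetters xs).map (fun b => if b = pvFirst s then 0 else pvDd xs s b * cntI xs r b (pvFirst s))).sum := by
          rw [List.map_congr_left (fun b _ => per_letter xs hne r hlr s b)]
    _ = ((pvLetters xs).map (fun b => 2 * (if b = pvFirst s then 0 else pvDd xs s b * cntI xs r b (pvFirst s)))).sum := by
          rw [List.sum_map_mul_left]
    _ = ((pvLetters xs).map (fun b => if b = pvFirst s then 0 else 2 * pvDd xs s b * cntI xs r b (pvFirst s))).sum := by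
          apply congrArg List.sum
          apply List.map_congr_left
          intro b _
          by_cases hb : b = pvFirst s
          · simp [hb]
          · simp only [if_neg hb]; ring
    _ = (((pvLetters xs).filter (fun b => !(b = pvFirst s : Bool))).map
          (fun b => 2 * pvDd xs s b * cntI xs r b (pvFirst s))).sum := by
          rw [sum_map_filter_of_zero (fun b => !(b = pvFirst s : Bool))
              (fun b => 2 * pvDd xs s b * cntI xs r b (pvFirst s)) (pvLetters xs) ?_]
          · apply congrArg List.sum
            apply List.map_congr_left
            intro b _
            by_cases hb : b = pvFirst s
            · simp [hb, pvDd_self xs s hs hsx]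
            · rw [if_neg hb]
          · intro b hbL hbf
            have hb : b = pvFirst s := by simpa using hbf
            simp [hb, pvDd_self xs s hs hsx]

lemma core (xs : List (List Char)) (hne : ∀ s ∈ xs, s ≠ []) (l : List (List Char))
    (hl : ∀ s ∈ l, s ∈ xs) :
    pairFold (wA xs) l
      = pairFold (fun a b => 2 * cntI xs l a b * cntI xs l b a) (pvLetters xs) := by
  induction l with
  | nil =>
    rw [pairFold_eq_zero (fun a b => 2 * cntI xs [] a b * cntI xs [] b a) (pvLetters xs)
        (fun a b => by simp [cntI])]
    rfl
  | cons s r ih =>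
    have hsx : s ∈ xs := hl s (List.mem_cons_self ..)
    have hs : s ≠ [] := hne s hsx
    have hlr : ∀ t ∈ r, t ∈ xs := fun t ht => hl t (List.mem_cons_of_mem _ ht)
    have ih' := ih hlr
    have hndL : (pvLetters xs).Nodup := PySem.List.nodup_dedup _
    have haL : pvFirst s ∈ pvLetters xs := (PySem.List.mem_dedup _ _).2 (List.mem_map.2 ⟨s, hsx, rfl⟩)
    have hrhs : pairFold (fun a b => 2 * cntI xs (s :: r) a b * cntI xs (s :: r) b a) (pvLetters xs)
        = pairFold (fun a b => 2 * cntI xs r a b * cntI xs r b a) (pvLetters xs)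
          + (((pvLetters xs).filter (fun b => !(b = pvFirst s : Bool))).map
              (fun b => 2 * pvDd xs s b * cntI xs r b (pvFirst s))).sum := by
      rw [pairFold_congr _
          (fun a b => (2 * cntI xs r a b * cntI xs r b a)
            + ((if a = pvFirst s then 2 * pvDd xs s b * cntI xs r b (pvFirst s) else 0)
               + (if b = pvFirst s then 2 * pvDd xs s a * cntI xs r a (pvFirst s) else 0)))
          (pvLetters xs) hndL ?_]
      · rw [pairFold_add,
            pairFold_delta (pvFirst s) (pvDd xs s) (fun b => cntI xs r b (pvFirst s)) (pvLetters xs) hndL haL]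
      · intro a haM b hbM hab
        rw [cnt_cons xs r s a b, cnt_cons xs r s b a]
        beta_reduce
        by_cases h1 : a = pvFirst s
        · have h2 : ¬ b = pvFirst s := fun e => hab (by rw [h1, e])
          rw [if_pos h1, if_neg h2, if_pos h1, if_neg h2, h1]
          ring
        · by_cases h2 : b = pvFirst s
          · rw [if_neg h1, if_pos h2, if_neg h1, if_pos h2, h2]
            ring
          · rw [if_neg h1, if_neg h2, if_neg h1, if_neg h2]
            ring
    show (r.map (wA xs s)).sum + pairFold (wA xs) r = _
    rw [middle_eq xs hne r hlr s hs hsx, ih', hrhs]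
    ring

lemma diag_zero (xs : List (List Char)) (hne : ∀ s ∈ xs, s ≠ []) :
    (List.map (fun s => wA xs s s) xs).sum = 0 := by
  apply List.sum_eq_zero
  intro x hx
  rcases List.mem_map.1 hx with ⟨s, hs, rfl⟩
  have hmem : pvFirst s :: pvSuf s ∈ xs := by rw [cons_first_suf s (hne s hs)]; exact hs
  simp [wA, hmem]

-- ===== VERDICT (by name: the statement is the Claim_ definition above) =====
theorem distinctNames2_spec : Claim_equal_distinctNames2 := by
  intro ideas hdom hpre
  have hne : ∀ s ∈ ideas.map String.toList, s ≠ [] := by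
    intro s hs
    rcases List.mem_map.1 hs with ⟨t, ht, rfl⟩
    simpa using hpre t ht
  unfold Spec_distinctNames2
  rw [A_eq ideas, diag_zero (ideas.map String.toList) hne, B_eq ideas hne,
      core (ideas.map String.toList) hne _ (fun s hs => hs)]
  ring
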